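-- pv_equiv track=rewrite | github.com/pypi-data/pypi-mirror-379 | packages/ewoksndreg/ewoksndreg-0.4.0.tar.gz/ewoksndreg-0.4.0/src/ewoksndreg/io/nexus.py | common_h5_parent
-- ===== SOURCE A (Python) =====
-- from itertools import takewhile
-- from typing import List
-- from typing import Tuple
--
-- def common_h5_parent(h5names: List[str]) -> Tuple[str, List[str]]:
--     """
--     :param h5names: Absolute HDF5 dataset or group names.
--     :returns: Name of the common parent and the relative names with respect to that parent.
--     """
--     split_h5names = [h5name.split("/") for h5name in h5names]
--     common_parent_groups = list(
--         takewhile(lambda parts: all(p == parts[0] for p in parts), zip(*split_h5names))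
--     )
--     ncommon = len(common_parent_groups)
--     parent_h5name = "/".join(split_h5names[0][:ncommon])
--     rel_h5names = ["/".join(parts[ncommon:]) for parts in split_h5names]
--     return parent_h5name, rel_h5names
-- ===== SOURCE B (Python) =====
-- from typing import List
-- from typing import Tuple
--
--
-- def common_h5_parent(h5names: List[str]) -> Tuple[str, List[str]]:
--     """
--     :param h5names: Absolute HDF5 dataset or group names.
--     :returns: Name of the common parent and the relative names with respect to that parent.
--     """
--     split_h5names = [h5name.split("/") for h5name in h5names]
--     prefix = split_h5names[0]
--     for parts in split_h5names[1:]: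
--         kept = []
--         for x, y in zip(prefix, parts):
--             if x != y:
--                 break
--             kept.append(x)
--         prefix = kept
--     ncommon = len(prefix)
--     parent_h5name = "/".join(prefix)
--     rel_h5names = ["/".join(parts[ncommon:]) for parts in split_h5names]
--     return parent_h5name, rel_h5names
-- ===== Notes on version B (the rewrite author's own statement) =====
-- stated objective: simpler
-- what changed: Replaces the transpose (zip of all split names) plus takewhile-over-columns with a row-wise fold that truncates a running common prefix against each split name in turn; no transposition or column tuples are built.
import Mathlib
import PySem

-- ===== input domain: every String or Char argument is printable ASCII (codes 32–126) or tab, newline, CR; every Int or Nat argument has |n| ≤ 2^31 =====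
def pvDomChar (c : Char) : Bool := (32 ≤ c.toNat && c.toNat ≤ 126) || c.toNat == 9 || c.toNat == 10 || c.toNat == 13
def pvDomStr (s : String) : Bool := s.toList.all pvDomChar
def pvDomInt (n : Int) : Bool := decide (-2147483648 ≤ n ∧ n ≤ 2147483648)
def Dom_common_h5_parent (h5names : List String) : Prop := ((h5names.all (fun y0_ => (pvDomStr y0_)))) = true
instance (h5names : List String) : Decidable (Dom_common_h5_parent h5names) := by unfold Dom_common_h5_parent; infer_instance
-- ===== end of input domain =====

-- B replaces A's transpose (zip of all split names) + takewhile-over-columns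
-- with a row-wise fold truncating a running common prefix; objective: simpler.


-- ===== PORT A =====
-- zip(*split_h5names): columns until some list runs out (exact Python zip semantics)
def pyZipCols : List (List String) → List (List String)
  | [] => []
  | l0 :: rest =>
    if h : l0 = [] ∨ rest.any (fun l => l.isEmpty) then []
    else (l0.headD "" :: rest.map (fun l => l.headD "")) ::
         pyZipCols (l0.tail :: rest.map List.tail)
  termination_by ls => (ls.headD []).length
  decreasing_by
    simp only [List.headD_cons]
    cases l0 with
    | nil => exact absurd (Or.inl rfl) h
    | cons a as => simp

-- all(p == parts[0] for p in parts)  (True on an empty tuple: parts[0] never evaluated)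
def colAllEq (parts : List String) : Bool := parts.all (fun p => p = parts.headD "")

-- n.split("/"): sep "/" is nonempty so split? is always some
def common_h5_parent (h5names : List String) : String × List String :=
  let split_h5names := h5names.map (fun n => (PySem.Str.split? n "/").getD [])
  let common_parent_groups := List.takeWhile colAllEq (pyZipCols split_h5names)
  let ncommon := common_parent_groups.length
  let parent_h5name := PySem.Str.join "/" ((split_h5names.headD []).take ncommon)
  let rel_h5names := split_h5names.map (fun parts => PySem.Str.join "/" (parts.drop ncommon))
  (parent_h5name, rel_h5names)

-- ===== PORT B =====
-- for x, y in zip(prefix, parts): if x != y: break; kept.append(x)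
def commonRun : List String → List String → List String
  | a :: as, b :: bs => if a = b then a :: commonRun as bs else []
  | _, _ => []

def common_h5_parent_alt (h5names : List String) : String × List String :=
  let split_h5names := h5names.map (fun n => (PySem.Str.split? n "/").getD [])
  let pref := (split_h5names.tail).foldl commonRun (split_h5names.headD [])
  let ncommon := pref.length
  let parent_h5name := PySem.Str.join "/" pref
  let rel_h5names := split_h5names.map (fun parts => PySem.Str.join "/" (parts.drop ncommon))
  (parent_h5name, rel_h5names)

-- ===== PRECONDITION & SPEC =====
-- Pre_ excludes only the empty list, on which A raises IndexError (split_h5names[0]).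
def Pre_common_h5_parent (h5names : List String) : Prop := h5names ≠ []
instance (h5names : List String) : Decidable (Pre_common_h5_parent h5names) := by unfold Pre_common_h5_parent; infer_instance
def pvWitness_common_h5_parent : List String := ["/a/b/c", "/a/b/d"]
def Spec_common_h5_parent (h5names : List String) (out : String × List String) : Prop := out = common_h5_parent_alt h5names
instance (h5names : List String) (out : String × List String) : Decidable (Spec_common_h5_parent h5names out) := by unfold Spec_common_h5_parent; infer_instance

-- ===== CLAIM (what is proved, stated in full; the proofs are below) =====
def Claim_equal_common_h5_parent : Prop := ∀ (h5names : List String), Dom_common_h5_parent h5names → Pre_common_h5_parent h5names → Spec_common_h5_parent h5names (common_h5_parent h5names)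

-- ===== LEMMAS AND PROOFS =====

theorem commonRun_nil_left (r : List String) : commonRun [] r = [] := by
  cases r <;> simp [commonRun]

theorem foldl_commonRun_nil (rest : List (List String)) :
    rest.foldl commonRun [] = [] := by
  induction rest with
  | nil => rfl
  | cons r rest ih => simp only [List.foldl, commonRun_nil_left]; exact ih

-- if every list in rest starts with a, one fold step peels off a
theorem foldl_commonRun_cons (a : String) (as : List String) (rest : List (List String))
    (h : ∀ r ∈ rest, r.head? = some a) :
    rest.foldl commonRun (a :: as) = a :: (rest.map List.tail).foldl commonRun as := by
  induction rest generalizing as with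
  | nil => rfl
  | cons r rest ih =>
    obtain ⟨t, rfl⟩ : ∃ t, r = a :: t := by
      cases r with
      | nil => simp at h
      | cons b bs =>
        have hb : b = a := by simpa using h (b :: bs) (by simp)
        exact ⟨bs, by rw [hb]⟩
    have step : commonRun (a :: as) (a :: t) = a :: commonRun as t := by
      simp [commonRun]
    simp only [List.foldl, List.map, List.tail_cons, step]
    exact ih (commonRun as t) (fun r hr => h r (by simp [hr]))

-- a fold whose accumulator is empty or headed by a dies on a list not headed by a
theorem foldl_commonRun_bad (a : String) (rest : List (List String)) :
    ∀ (p : List String), (p = [] ∨ p.head? = some a) →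
    (∃ r ∈ rest, r.head? ≠ some a) →
    rest.foldl commonRun p = [] := by
  induction rest with
  | nil => intro p _ hbad; simp at hbad
  | cons r rest ih =>
    intro p hp hbad
    rcases hp with rfl | hp
    · simp only [List.foldl, commonRun_nil_left]; exact foldl_commonRun_nil rest
    · obtain ⟨xs, rfl⟩ : ∃ xs, p = a :: xs := by
        cases p with
        | nil => simp at hp
        | cons x xs =>
          have hx : x = a := by simpa using hp
          exact ⟨xs, by rw [hx]⟩
      by_cases hr : r.head? = some a
      · obtain ⟨t, rfl⟩ : ∃ t, r = a :: t := by
          cases r with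
          | nil => simp at hr
          | cons b bs =>
            have hb : b = a := by simpa using hr
            exact ⟨bs, by rw [hb]⟩
        have step : commonRun (a :: xs) (a :: t) = a :: commonRun xs t := by
          simp [commonRun]
        simp only [List.foldl, step]
        apply ih (a :: commonRun xs t) (Or.inr rfl)
        obtain ⟨s, hs, hsne⟩ := hbad
        rcases List.mem_cons.mp hs with rfl | hs'
        · exact absurd hr hsne
        · exact ⟨s, hs', hsne⟩
      · have step : commonRun (a :: xs) r = [] := by
          cases r with
          | nil => rfl
          | cons b bs =>
            have hba : a ≠ b := fun h => hr (by simp [← h])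
            simp [commonRun, hba]
        simp only [List.foldl, step]
        exact foldl_commonRun_nil rest
-- the number of columns zip produces is at most the first list's length
theorem pyZipCols_length_le (l0 : List String) (rest : List (List String)) :
    (pyZipCols (l0 :: rest)).length ≤ l0.length := by
  induction l0 generalizing rest with
  | nil => rw [pyZipCols]; simp
  | cons a as ih =>
    rw [pyZipCols]
    split
    · simp
    · simpa using ih (rest.map List.tail)

-- MAIN: the row-wise fold equals the take of A's column count
theorem fold_eq_take (l0 : List String) (rest : List (List String)) :
    rest.foldl commonRun l0
      = l0.take (List.takeWhile colAllEq (pyZipCols (l0 :: rest))).length := by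
  induction l0 generalizing rest with
  | nil => simp [foldl_commonRun_nil]
  | cons a as ih =>
    by_cases hgood : ∀ r ∈ rest, r.head? = some a
    · have hne : ¬((a :: as) = [] ∨ rest.any (fun l => l.isEmpty)) := by
        simp only [List.any_eq_true, not_or]
        refine ⟨by simp, ?_⟩
        rintro ⟨r, hr, hre⟩
        have h := hgood r hr
        cases r with
        | nil => simp at h
        | cons b bs => simp at hre
      rw [pyZipCols, dif_neg hne]
      simp only [List.headD_cons, List.tail_cons]
      have hcol : colAllEq (a :: rest.map (fun l => l.headD "")) = true := by
        simp only [colAllEq, List.headD_cons, List.all_eq_true, decide_eq_true_eq]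
        intro p hp
        rcases List.mem_cons.mp hp with rfl | hp
        · rfl
        · obtain ⟨r, hr, rfl⟩ := List.mem_map.mp hp
          have h := hgood r hr
          cases r with
          | nil => simp at h
          | cons b bs => simpa using h
      rw [List.takeWhile_cons, if_pos hcol]
      simp only [List.length_cons, List.take_succ_cons]
      rw [foldl_commonRun_cons a as rest hgood, ih (rest.map List.tail)]
    · push Not at hgood
      have hlhs : rest.foldl commonRun (a :: as) = [] :=
        foldl_commonRun_bad a rest (a :: as) (Or.inr rfl) hgood
      rw [hlhs]
      by_cases hemp : rest.any (fun l => l.isEmpty)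
      · rw [pyZipCols, dif_pos (Or.inr hemp)]; simp
      · have hne : ¬((a :: as) = [] ∨ rest.any (fun l => l.isEmpty)) := by
          simp [hemp]
        rw [pyZipCols, dif_neg hne]
        simp only [List.headD_cons, List.tail_cons]
        obtain ⟨s, hs, hsne⟩ := hgood
        have hcol : colAllEq (a :: rest.map (fun l => l.headD "")) = false := by
          cases s with
          | nil =>
            exfalso
            simp only [List.any_eq_true] at hemp
            exact hemp ⟨[], hs, rfl⟩
          | cons b bs =>
            have hba : b ≠ a := by simpa using hsne
            simp only [colAllEq, List.headD_cons]
            rw [List.all_eq_false]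
            refine ⟨b, List.mem_cons.mpr (Or.inr ?_), by simpa using hba⟩
            exact List.mem_map.mpr ⟨b :: bs, hs, rfl⟩
        rw [List.takeWhile_cons, if_neg (by simp only [hcol]; exact Bool.false_ne_true)]
        simp

-- ===== VERDICT (by name: the statement is the Claim_ definition above) =====
theorem common_h5_parent_spec : Claim_equal_common_h5_parent := by
  intro h5names _ hpre
  unfold Spec_common_h5_parent common_h5_parent common_h5_parent_alt
  cases h5names with
  | nil => exact absurd rfl hpre
  | cons h t =>
    simp only [List.map_cons, List.headD_cons, List.tail_cons]
    set s0 := (PySem.Str.split? h "/").getD [] with hs0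
    set srest := t.map (fun n => (PySem.Str.split? n "/").getD []) with hsrest
    have hmain := fold_eq_take s0 srest
    set n := (List.takeWhile colAllEq (pyZipCols (s0 :: srest))).length with hn
    have hle : n ≤ s0.length :=
      le_trans (List.takeWhile_prefix colAllEq).length_le (pyZipCols_length_le s0 srest)
    have hlen : (srest.foldl commonRun s0).length = n := by
      rw [hmain, List.length_take]; omega
    rw [hmain] at hlen ⊢
    rw [hlen]
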